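-- pv_equiv track=rewrite | github.com/YKawesome/Advent-of-Code | Day 05/Part 1/day05.py | check_seq
-- ===== SOURCE A (Python) =====
-- def check_seq(sequence: list[int], beforedict: dict[int, set[int]]) -> bool:
--     past = set()
--     for i in sequence:
--         if i in past:
--             return False
--         if i in beforedict:
--             past = past.union(beforedict[i])
--
--     return True
-- ===== SOURCE B (Python) =====
-- def check_seq(sequence: list[int], beforedict: dict[int, set[int]]) -> bool:
--     lastpos = {}
--     for p, i in enumerate(sequence):
--         lastpos[i] = p
--     for p, i in enumerate(sequence):
--         if i in beforedict:
--             for e in beforedict[i]: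
--                 if lastpos.get(e, -1) > p:
--                     return False
--     return True
-- ===== Notes on version B (the rewrite author's own statement) =====
-- stated objective: alternative
-- what changed: Replaced the forward scan that accumulates a growing banned-set union with a precomputed last-index table plus a per-position check of each before-set against that table.
import Mathlib
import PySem

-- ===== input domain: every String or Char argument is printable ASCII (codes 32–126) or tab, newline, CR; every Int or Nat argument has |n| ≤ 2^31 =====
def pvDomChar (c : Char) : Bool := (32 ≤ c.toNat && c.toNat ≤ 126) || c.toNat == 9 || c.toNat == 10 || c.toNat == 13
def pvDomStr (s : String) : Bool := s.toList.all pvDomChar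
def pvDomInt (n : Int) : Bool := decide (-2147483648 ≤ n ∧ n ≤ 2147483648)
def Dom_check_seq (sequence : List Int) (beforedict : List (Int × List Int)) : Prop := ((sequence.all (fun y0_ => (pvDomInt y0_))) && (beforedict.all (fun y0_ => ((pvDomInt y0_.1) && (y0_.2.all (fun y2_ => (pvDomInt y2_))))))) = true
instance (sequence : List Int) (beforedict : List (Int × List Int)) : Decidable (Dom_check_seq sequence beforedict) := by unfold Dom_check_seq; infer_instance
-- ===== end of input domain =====

-- B replaces A's accumulated banned-set union with a precomputed last-index table checked per position (alternative algorithm, same return value).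

-- ===== PORT A =====
def check_seq_go (beforedict : List (Int × List Int)) (past : PySem.Set Int) : List Int → Bool
  | [] => true
  | i :: rest =>
    if PySem.Set.contains past i then false
    else
      match (PySem.Dict.mk beforedict).get? i with
      | some s => check_seq_go beforedict (PySem.Set.union past s) rest
      | none => check_seq_go beforedict past rest

def check_seq (sequence : List Int) (beforedict : List (Int × List Int)) : Bool :=
  check_seq_go beforedict PySem.Set.empty sequence

-- ===== PORT B =====
def lastposOf (sequence : List Int) : PySem.Dict Int Int :=
  (PySem.List.enumerate sequence).foldl (fun d pi => d.insert pi.2 pi.1) PySem.Dict.empty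

def check_seq_alt (sequence : List Int) (beforedict : List (Int × List Int)) : Bool :=
  let lastpos := lastposOf sequence
  (PySem.List.enumerate sequence).all (fun pi =>
    match (PySem.Dict.mk beforedict).get? pi.2 with
    | some s => s.all (fun e => !(decide (pi.1 < lastpos.getD e (-1))))
    | none => true)

-- ===== PRECONDITION & SPEC =====
def Spec_check_seq (sequence : List Int) (beforedict : List (Int × List Int)) (out : Bool) : Prop := out = check_seq_alt sequence beforedict
instance (sequence : List Int) (beforedict : List (Int × List Int)) (out : Bool) : Decidable (Spec_check_seq sequence beforedict out) := by unfold Spec_check_seq; infer_instance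

-- ===== CLAIM (what is proved, stated in full; the proofs are below) =====
def Claim_equal_check_seq : Prop := ∀ (sequence : List Int) (beforedict : List (Int × List Int)), Dom_check_seq sequence beforedict → Spec_check_seq sequence beforedict (check_seq sequence beforedict)

-- ===== LEMMAS AND PROOFS =====

/-- `x` lies in the before-set that `beforedict` associates with `i`. -/
def memS (bd : List (Int × List Int)) (i x : Int) : Prop :=
  ∃ s, (PySem.Dict.mk bd).get? i = some s ∧ x ∈ s

theorem goA_iff (bd : List (Int × List Int)) (l : List Int) : ∀ past : PySem.Set Int,
    (check_seq_go bd past l = true ↔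
      ∀ q, q < l.length → ¬ ((l.getD q 0 ∈ past) ∨ ∃ p, p < q ∧ memS bd (l.getD p 0) (l.getD q 0))) := by
  induction l with
  | nil => intro past; simp [check_seq_go]
  | cons i rest ih =>
    intro past
    rw [check_seq_go]
    by_cases hmem : i ∈ past
    · have hc : PySem.Set.contains past i = true := by
        simp [hmem]
      simp only [hc, if_true]
      constructor
      · intro h; exact absurd h (by simp)
      · intro h
        exact absurd (Or.inl (by simpa using hmem)) (h 0 (by simp))
    · have hc : PySem.Set.contains past i = false := by
        simpa [PySem.Set.contains_iff] using hmem
      -- helper: relate the (q+1) case to the rest-case with updated past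
      cases hget : (PySem.Dict.mk bd).get? i with
      | none =>
        simp only [hc, Bool.false_eq_true, if_false]
        rw [ih past]
        constructor
        · intro h q hq
          match q with
          | 0 =>
            simp only [List.getD_cons_zero]
            rintro (h0 | ⟨p, hp, _⟩)
            · exact hmem h0
            · omega
          | (q' + 1) =>
            simp only [List.getD_cons_succ, List.length_cons] at *
            rintro (h0 | ⟨p, hp, hms⟩)
            · exact h q' (by omega) (Or.inl h0)
            · match p with
              | 0 =>
                simp only [List.getD_cons_zero] at hms
                rcases hms with ⟨s, hs, _⟩
                rw [hget] at hs; cases hs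
              | (p' + 1) =>
                simp only [List.getD_cons_succ] at hms
                exact h q' (by omega) (Or.inr ⟨p', by omega, hms⟩)
        · intro h q hq
          rintro (h0 | ⟨p, hp, hms⟩)
          · exact h (q + 1) (by simpa using Nat.succ_lt_succ hq) (Or.inl (by simpa using h0))
          · exact h (q + 1) (by simpa using Nat.succ_lt_succ hq)
              (Or.inr ⟨p + 1, by omega, by simpa using hms⟩)
      | some s =>
        simp only [hc, Bool.false_eq_true, if_false]
        rw [ih (PySem.Set.union past s)]
        constructor
        · intro h q hq
          match q with
          | 0 =>
            simp only [List.getD_cons_zero]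
            rintro (h0 | ⟨p, hp, _⟩)
            · exact hmem h0
            · omega
          | (q' + 1) =>
            simp only [List.getD_cons_succ, List.length_cons] at *
            rintro (h0 | ⟨p, hp, hms⟩)
            · exact h q' (by omega) (Or.inl (by rw [PySem.Set.mem_union]; exact Or.inl h0))
            · match p with
              | 0 =>
                simp only [List.getD_cons_zero] at hms
                rcases hms with ⟨s', hs', hxs'⟩
                rw [hget] at hs'
                cases hs'
                exact h q' (by omega) (Or.inl (by rw [PySem.Set.mem_union]; exact Or.inr hxs'))
              | (p' + 1) =>
                simp only [List.getD_cons_succ] at hms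
                exact h q' (by omega) (Or.inr ⟨p', by omega, hms⟩)
        · intro h q hq
          rintro (h0 | ⟨p, hp, hms⟩)
          · rw [PySem.Set.mem_union] at h0
            rcases h0 with h0 | h0
            · exact h (q + 1) (by simpa using Nat.succ_lt_succ hq) (Or.inl (by simpa using h0))
            · exact h (q + 1) (by simpa using Nat.succ_lt_succ hq)
                (Or.inr ⟨0, by omega, by simpa using ⟨s, hget, h0⟩⟩)
          · exact h (q + 1) (by simpa using Nat.succ_lt_succ hq)
              (Or.inr ⟨p + 1, by omega, by simpa using hms⟩)

theorem lastposOf_append (l : List Int) (x : Int) :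
    lastposOf (l ++ [x]) = (lastposOf l).insert x (l.length : Int) := by
  unfold lastposOf
  rw [PySem.List.enumerate_append]
  simp [PySem.List.enumerate_cons, PySem.List.enumerate_nil, List.foldl_append]

theorem lastpos_getD_iff (l : List Int) (e : Int) (p : ℕ) :
    ((p : Int) < (lastposOf l).getD e (-1)) ↔
      ∃ q, p < q ∧ q < l.length ∧ l.getD q 0 = e := by
  induction l using List.reverseRecOn with
  | nil =>
    simp only [lastposOf, PySem.List.enumerate_nil, List.foldl_nil, PySem.Dict.getD_empty]
    constructor
    · intro h; omega
    · rintro ⟨q, _, hq, _⟩; simp at hq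
  | append_singleton l x ih =>
    rw [lastposOf_append, PySem.Dict.getD_insert]
    by_cases hex : e = x
    · subst hex
      rw [if_pos rfl]
      constructor
      · intro h
        refine ⟨l.length, by exact_mod_cast h, by simp, ?_⟩
        rw [List.getD_eq_getElem (l ++ [e]) 0 (by simp)]
        simp
      · rintro ⟨q, hpq, hq, _⟩
        simp only [List.length_append, List.length_singleton] at hq
        exact_mod_cast show p < l.length by omega
    · simp only [if_neg hex]
      rw [ih]
      constructor
      · rintro ⟨q, hpq, hq, hval⟩
        refine ⟨q, hpq, by simp; omega, ?_⟩
        rw [List.getD_eq_getElem (l ++ [x]) 0 (by simp; omega),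
          List.getElem_append_left hq, ← List.getD_eq_getElem l 0 hq]
        exact hval
      · rintro ⟨q, hpq, hq, hval⟩
        simp only [List.length_append, List.length_singleton] at hq
        have hq' : q < l.length := by
          rcases Nat.lt_or_ge q l.length with h | h
          · exact h
          · exfalso
            have : q = l.length := by omega
            subst this
            rw [List.getD_eq_getElem (l ++ [x]) 0 (by simp)] at hval
            simp at hval
            exact hex hval.symm
        refine ⟨q, hpq, hq', ?_⟩
        rw [List.getD_eq_getElem (l ++ [x]) 0 (by simp; omega),
          List.getElem_append_left hq'] at hval
        rw [List.getD_eq_getElem l 0 hq']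
        exact hval

theorem alt_iff (sequence : List Int) (bd : List (Int × List Int)) :
    check_seq_alt sequence bd = true ↔
      ∀ k, k < sequence.length → ∀ e, memS bd (sequence.getD k 0) e →
        ¬ ∃ q, k < q ∧ q < sequence.length ∧ sequence.getD q 0 = e := by
  unfold check_seq_alt
  rw [List.all_eq_true]
  constructor
  · intro h k hk e hms ⟨q, hkq, hq, hval⟩
    have hpi : ((k : Int), sequence[k]) ∈ PySem.List.enumerate sequence 0 := by
      rw [PySem.List.mem_enumerate_iff]
      exact ⟨k, hk, by simp⟩
    have := h _ hpi
    rcases hms with ⟨s, hs, hes⟩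
    rw [show sequence.getD k 0 = sequence[k] from List.getD_eq_getElem _ _ hk] at hs
    simp only [hs] at this
    rw [List.all_eq_true] at this
    have := this e hes
    simp only [Bool.not_eq_eq_eq_not, Bool.not_true, decide_eq_false_iff_not] at this
    exact this ((lastpos_getD_iff sequence e k).mpr ⟨q, hkq, hq, hval⟩)
  · intro h pi hpi
    rw [PySem.List.mem_enumerate_iff] at hpi
    rcases hpi with ⟨k, hk, hpi⟩
    subst hpi
    simp only [zero_add]
    cases hget : (PySem.Dict.mk bd).get? sequence[k] with
    | none => rfl
    | some s =>
      rw [List.all_eq_true]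
      intro e hes
      simp only [Bool.not_eq_eq_eq_not, Bool.not_true, decide_eq_false_iff_not]
      intro hlt
      rcases (lastpos_getD_iff sequence e k).mp hlt with ⟨q, hkq, hq, hval⟩
      exact h k hk e ⟨s, by rwa [List.getD_eq_getElem _ _ hk], hes⟩ ⟨q, hkq, hq, hval⟩

-- ===== VERDICT (by name: the statement is the Claim_ definition above) =====
theorem check_seq_spec : Claim_equal_check_seq := by
  intro sequence bd _
  unfold Spec_check_seq
  rw [Bool.eq_iff_iff, show check_seq sequence bd = check_seq_go bd PySem.Set.empty sequence from rfl,
    goA_iff bd sequence PySem.Set.empty, alt_iff]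
  constructor
  · intro h k hk e hms ⟨q, hkq, hq, hval⟩
    exact h q hq (Or.inr ⟨k, hkq, by rw [hval]; exact hms⟩)
  · intro h q hq
    rintro (h0 | ⟨p, hp, hms⟩)
    · simp [PySem.Set.empty] at h0
    · exact h p (by omega) _ hms ⟨q, hp, hq, rfl⟩
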